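-- pv_equiv track=rewrite | github.com/BDjaekwanee/Pythonic | 성격유형검사하기.py | solution
-- ===== SOURCE A (Python) =====
-- def solution(survey, choices):
--     s = ''
--     for i, c in zip(survey, choices):
--         mydic = {1:i[0]*3, 2:i[0]*2, 3:i[0]*1, 4:'', 5:i[1], 6:i[1]*2, 7:i[1]*3} #딕셔너리 형태로 전환해주어서 score 점수를 셀 수 있게 만들어 주었음.
--
--         s += mydic[c] # 이렇게 하게 되면 RRRTTANA 뭐 이런식으로 나오는데 이걸 리스트로 바꾸고 카운트를 셀 필요가 있었음.
--     s = list(s)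
--
--     answer =''
--
--     # 이 부분의 로직은 카카오에서 성격 유형이 ENTP 이런식으로 순서가 있기 때문에 순서에 맞게 결과물을 짜야 됬고, 때문에 if문을 활용하여
--     # 문제에서 제시한 순서대로 정돈되게 구연하였음.
--     # 동점인 경우 사전순이 먼저라고 해서 if 문에서 같거나 크다, 를 활용해 로직 적용.
--
--     if s.count('R') >= s.count('T'):
--         answer += 'R'
--     else: answer += 'T'
--
--     if s.count('C') >= s.count('F'):
--         answer += 'C'
--     else: answer += 'F'
--
--     if s.count('J') >= s.count('M'):
--         answer += 'J'
--     else: answer += 'M'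
--
--     if s.count('A') >= s.count('N'):
--         answer += 'A'
--     else: answer += 'N'
--
--     return answer
-- ===== SOURCE B (Python) =====
-- def solution(survey, choices):
--     # For each fixed pair, one scan computing the SIGNED score difference a-vs-b;
--     # no tally container at all: the pair letter wins iff its signed difference >= 0.
--     def pref(a, b):
--         diff = 0
--         for p, c in zip(survey, choices):
--             w = 4 - c
--             if w > 0:
--                 t = p[0]
--             elif w < 0:
--                 t, w = p[1], -w
--             else:
--                 continue
--             if t == a:
--                 diff += w
--             elif t == b:
--                 diff -= w
--         return a if diff >= 0 else b
--     return ''.join(pref(a, b) for a, b in ("RT", "CF", "JM", "AN"))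
-- ===== Notes on version B (the rewrite author's own statement) =====
-- stated objective: alternative
-- what changed: A builds a weighted letter string and rescans it with eight count() passes; B keeps no tally container at all: for each of the four fixed pairs it makes one scan computing a single SIGNED score difference (add the weight when the leaned-to letter is the pair's first, subtract when it is the second) and picks the first letter iff the difference is >= 0.
import Mathlib
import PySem

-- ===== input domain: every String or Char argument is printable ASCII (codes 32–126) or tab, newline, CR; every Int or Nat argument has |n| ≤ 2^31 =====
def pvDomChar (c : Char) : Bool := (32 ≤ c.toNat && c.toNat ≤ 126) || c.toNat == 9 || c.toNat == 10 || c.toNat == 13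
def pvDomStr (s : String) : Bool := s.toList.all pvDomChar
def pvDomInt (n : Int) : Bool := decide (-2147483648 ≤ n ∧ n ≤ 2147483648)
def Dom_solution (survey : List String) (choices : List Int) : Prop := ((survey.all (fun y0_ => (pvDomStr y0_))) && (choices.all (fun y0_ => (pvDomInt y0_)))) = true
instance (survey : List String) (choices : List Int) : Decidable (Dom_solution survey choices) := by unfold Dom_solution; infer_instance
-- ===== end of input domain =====

-- B replaces A's weighted letter string + eight count() rescans by four per-pair scans,
-- each maintaining a single signed score difference (objective: alternative, no tally container).

-- ===== PORT A =====
-- one loop step of A: build mydic from i and c, look up c, append to s (KeyError/IndexError cases excluded by Pre_)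
def solutionStepA (s : List Char) (p : String × Int) : List Char :=
  let i := p.1
  let c := p.2
  let i0 := (PySem.Str.pyGet? i 0).getD ' '
  let i1 := (PySem.Str.pyGet? i 1).getD ' '
  let mydic : PySem.Dict Int (List Char) :=
    PySem.Dict.ofList
      [(1, List.replicate 3 i0), (2, List.replicate 2 i0), (3, List.replicate 1 i0),
       (4, []), (5, [i1]), (6, List.replicate 2 i1), (7, List.replicate 3 i1)]
  s ++ (mydic.get? c).getD []

def solution (survey : List String) (choices : List Int) : String :=
  let s : List Char := (survey.zip choices).foldl solutionStepA []
  let answer : List Char :=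
    ((((([] : List Char)
      ++ (if s.count 'R' ≥ s.count 'T' then ['R'] else ['T']))
      ++ (if s.count 'C' ≥ s.count 'F' then ['C'] else ['F']))
      ++ (if s.count 'J' ≥ s.count 'M' then ['J'] else ['M']))
      ++ (if s.count 'A' ≥ s.count 'N' then ['A'] else ['N']))
  String.ofList answer

-- ===== PORT B =====
-- one loop step of B's per-pair scan: add/subtract the question's weight to the signed difference
def solutionStepB (a b : Char) (diff : Int) (p : String × Int) : Int :=
  let c := p.2
  let w := 4 - c
  if w > 0 then
    let t := (PySem.Str.pyGet? p.1 0).getD ' '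
    if t == a then diff + w else if t == b then diff - w else diff
  else if w < 0 then
    let t := (PySem.Str.pyGet? p.1 1).getD ' '
    let w' := -w
    if t == a then diff + w' else if t == b then diff - w' else diff
  else diff

def solutionPref (survey : List String) (choices : List Int) (a b : Char) : Char :=
  if (survey.zip choices).foldl (solutionStepB a b) 0 ≥ 0 then a else b

def solution_alt (survey : List String) (choices : List Int) : String :=
  String.ofList
    ([('R','T'), ('C','F'), ('J','M'), ('A','N')].map
      (fun pr => solutionPref survey choices pr.1 pr.2))

-- ===== PRECONDITION & SPEC =====
-- Pre_: exactly where A returns — every paired choice is 1..7 (else KeyError) and every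
-- paired survey string has length ≥ 2 (A's dict literal evaluates i[0] and i[1]; else IndexError).
def Pre_solution (survey : List String) (choices : List Int) : Prop :=
  ∀ p ∈ survey.zip choices, (1 ≤ p.2 ∧ p.2 ≤ 7) ∧ 2 ≤ p.1.toList.length
instance (survey : List String) (choices : List Int) : Decidable (Pre_solution survey choices) := by
  unfold Pre_solution; infer_instance
def pvWitness_solution : List String × List Int := (["RT", "CF", "AN"], [1, 6, 4])

def Spec_solution (survey : List String) (choices : List Int) (out : String) : Prop := out = solution_alt survey choices
instance (survey : List String) (choices : List Int) (out : String) : Decidable (Spec_solution survey choices out) := by unfold Spec_solution; infer_instance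

-- ===== CLAIM (what is proved, stated in full; the proofs are below) =====
def Claim_equal_solution : Prop := ∀ (survey : List String) (choices : List Int), Dom_solution survey choices → Pre_solution survey choices → Spec_solution survey choices (solution survey choices)

-- ===== LEMMAS AND PROOFS =====

-- A's step at each literal choice value (the dict lookup, reduced)
theorem stepA_1 (s : List Char) (i : String) :
    solutionStepA s (i, 1) = s ++ List.replicate 3 ((PySem.Str.pyGet? i 0).getD ' ') := rfl
theorem stepA_2 (s : List Char) (i : String) :
    solutionStepA s (i, 2) = s ++ List.replicate 2 ((PySem.Str.pyGet? i 0).getD ' ') := rfl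
theorem stepA_3 (s : List Char) (i : String) :
    solutionStepA s (i, 3) = s ++ List.replicate 1 ((PySem.Str.pyGet? i 0).getD ' ') := rfl
theorem stepA_4 (s : List Char) (i : String) : solutionStepA s (i, 4) = s ++ [] := rfl
theorem stepA_5 (s : List Char) (i : String) :
    solutionStepA s (i, 5) = s ++ List.replicate 1 ((PySem.Str.pyGet? i 1).getD ' ') := rfl
theorem stepA_6 (s : List Char) (i : String) :
    solutionStepA s (i, 6) = s ++ List.replicate 2 ((PySem.Str.pyGet? i 1).getD ' ') := rfl
theorem stepA_7 (s : List Char) (i : String) :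
    solutionStepA s (i, 7) = s ++ List.replicate 3 ((PySem.Str.pyGet? i 1).getD ' ') := rfl

-- one B step equals the old difference plus the signed count change of A's appended block
theorem stepB_count (a b : Char) (hab : a ≠ b) (d : Int) (s : List Char) (p : String × Int)
    (hc : 1 ≤ p.2 ∧ p.2 ≤ 7) :
    solutionStepB a b d p
      = d + (((solutionStepA s p).count a : Int) - ((s.count a : Int)))
          - (((solutionStepA s p).count b : Int) - ((s.count b : Int))) := by
  obtain ⟨i, c⟩ := p
  obtain ⟨h1, h7⟩ := hc
  simp only at h1 h7
  interval_cases c <;>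
    simp only [stepA_1, stepA_2, stepA_3, stepA_4, stepA_5, stepA_6, stepA_7, solutionStepB] <;>
    norm_num [List.count_append, List.count_replicate] <;>
    split_ifs <;> simp_all

-- the per-pair fold equals the signed letter-count difference of A's string
theorem foldB_count (a b : Char) (hab : a ≠ b) (l : List (String × Int))
    (hl : ∀ p ∈ l, 1 ≤ p.2 ∧ p.2 ≤ 7) (d : Int) (s : List Char) :
    l.foldl (solutionStepB a b) d
      = d + (((l.foldl solutionStepA s).count a : Int) - (s.count a : Int))
          - (((l.foldl solutionStepA s).count b : Int) - (s.count b : Int)) := by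
  induction l generalizing d s with
  | nil => simp
  | cons p l ih =>
    simp only [List.foldl_cons]
    rw [ih (fun q hq => hl q (List.mem_cons_of_mem _ hq)) _ (solutionStepA s p),
        stepB_count a b hab d s p (hl p List.mem_cons_self)]
    omega

-- ===== VERDICT (by name: the statement is the Claim_ definition above) =====
theorem solution_spec : Claim_equal_solution := by
  intro survey choices _ hpre
  unfold Spec_solution solution solution_alt solutionPref
  set l := survey.zip choices with hlz
  set s := l.foldl solutionStepA [] with hs
  have key : ∀ a b : Char, a ≠ b →
      (if l.foldl (solutionStepB a b) 0 ≥ 0 then a else b)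
        = (if s.count a ≥ s.count b then a else b) := by
    intro a b hab
    rw [foldB_count a b hab l (fun p hp => (hpre p hp).1) 0 [], ← hs]
    simp only [List.count_nil]
    split_ifs <;> first | rfl | omega
  simp only [List.map_cons, List.map_nil, List.nil_append, List.append_assoc]
  rw [key 'R' 'T' (by decide), key 'C' 'F' (by decide),
      key 'J' 'M' (by decide), key 'A' 'N' (by decide)]
  split_ifs <;> rfl
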